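-- pv_equiv track=rewrite | github.com/dyllonj/Nyx | server.py | _feedback_counts
-- ===== SOURCE A (Python) =====
-- _FEEDBACK_VERDICTS = ("helpful", "too_generic", "not_grounded", "unsafe")
--
-- def _feedback_counts(rows) -> dict:
--     counts = {verdict: 0 for verdict in _FEEDBACK_VERDICTS}
--     for row in rows:
--         verdict = row["verdict"]
--         if verdict in counts:
--             counts[verdict] += 1
--     counts["total"] = sum(counts.values())
--     return counts
-- ===== SOURCE B (Python) =====
-- _FEEDBACK_VERDICTS = ("helpful", "too_generic", "not_grounded", "unsafe")
--
-- def _feedback_counts(rows) -> dict: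
--     rows = list(rows)
--     counts = {v: sum(1 for row in rows if row["verdict"] == v)
--               for v in _FEEDBACK_VERDICTS}
--     counts["total"] = sum(counts.values())
--     return counts
-- ===== Notes on version B (the rewrite author's own statement) =====
-- stated objective: idiomatic
-- what changed: B materializes the rows once and builds the counts with a per-category dict comprehension (one scan of the rows per verdict, counting equality) instead of A's single accumulating pass that mutates a pre-seeded dict row by row; the total is then summed over the comprehension's values.
import Mathlib
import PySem

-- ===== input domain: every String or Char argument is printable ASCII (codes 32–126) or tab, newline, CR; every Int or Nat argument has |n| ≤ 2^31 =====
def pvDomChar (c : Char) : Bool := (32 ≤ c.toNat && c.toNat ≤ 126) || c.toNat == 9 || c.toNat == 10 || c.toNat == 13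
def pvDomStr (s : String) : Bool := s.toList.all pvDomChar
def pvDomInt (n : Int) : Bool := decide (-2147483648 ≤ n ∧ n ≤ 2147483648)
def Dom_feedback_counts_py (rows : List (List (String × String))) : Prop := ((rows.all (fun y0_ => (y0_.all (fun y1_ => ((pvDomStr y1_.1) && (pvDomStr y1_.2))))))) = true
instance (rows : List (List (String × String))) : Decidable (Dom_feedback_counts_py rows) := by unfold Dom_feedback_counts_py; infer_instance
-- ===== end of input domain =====

-- B replaces A's single accumulating pass over a pre-seeded dict by an idiomatic
-- per-category dict comprehension (one count per verdict); return value only.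

-- ===== PORT A =====
def feedback_counts_py (rows : List (List (String × String))) : List (String × Int) :=
  let counts : PySem.Dict String Int :=
    PySem.Dict.mk [("helpful", 0), ("too_generic", 0), ("not_grounded", 0), ("unsafe", 0)]
  let counts := rows.foldl (fun d row =>
    match (PySem.Dict.mk row).get? "verdict" with
    | none => d   -- Python raises KeyError here; such inputs are excluded by Pre_
    | some verdict => if d.contains verdict then d.modify verdict 0 (· + 1) else d) counts
  (counts.insert "total" (counts.values.foldl (· + ·) 0)).items

-- ===== PORT B =====
def feedback_counts_py_alt (rows : List (List (String × String))) : List (String × Int) :=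
  let verdicts : List String := ["helpful", "too_generic", "not_grounded", "unsafe"]
  let counts : List (String × Int) := verdicts.map (fun v =>
    (v, ((rows.countP (fun row => (PySem.Dict.mk row).get? "verdict" == some v) : Nat) : Int)))
  counts ++ [("total", (counts.map (·.2)).foldl (· + ·) 0)]

-- ===== PRECONDITION & SPEC =====
-- Pre_ excludes exactly the inputs containing a row without a "verdict" key, on which
-- the Python A (and B alike) raises KeyError.
def Pre_feedback_counts_py (rows : List (List (String × String))) : Prop :=
  (rows.all (fun row => (PySem.Dict.mk row).contains "verdict")) = true
instance (rows : List (List (String × String))) : Decidable (Pre_feedback_counts_py rows) := by unfold Pre_feedback_counts_py; infer_instance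

def pvWitness_feedback_counts_py : (List (List (String × String))) :=
  [[("verdict", "helpful")], [("verdict", "meh"), ("x", "y")], [("verdict", "unsafe")]]

def Spec_feedback_counts_py (rows : List (List (String × String))) (out : List (String × Int)) : Prop := out = feedback_counts_py_alt rows
instance (rows : List (List (String × String))) (out : List (String × Int)) : Decidable (Spec_feedback_counts_py rows out) := by unfold Spec_feedback_counts_py; infer_instance

-- ===== CLAIM (what is proved, stated in full; the proofs are below) =====
def Claim_equal_feedback_counts_py : Prop := ∀ (rows : List (List (String × String))), Dom_feedback_counts_py rows → Pre_feedback_counts_py rows → Spec_feedback_counts_py rows (feedback_counts_py rows)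

-- ===== LEMMAS AND PROOFS =====

-- count of rows whose "verdict" equals v
def pvCnt (v : String) (rows : List (List (String × String))) : Int :=
  ((rows.countP (fun row => (PySem.Dict.mk row).get? "verdict" == some v) : Nat) : Int)

lemma pvCnt_cons (v : String) (r : List (String × String)) (rs : List (List (String × String))) :
    pvCnt v (r :: rs) =
      pvCnt v rs + (if (PySem.Dict.mk r).get? "verdict" == some v then 1 else 0) := by
  by_cases hp : ((PySem.Dict.mk r).get? "verdict" == some v) = true <;>
    simp [pvCnt, hp]

lemma pvLoop_eq (rows : List (List (String × String)))
    (h : Pre_feedback_counts_py rows) (a b c d : Int) :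
    rows.foldl (fun d row =>
      match (PySem.Dict.mk row).get? "verdict" with
      | none => d
      | some verdict => if d.contains verdict then d.modify verdict 0 (· + 1) else d)
      (PySem.Dict.mk [("helpful", a), ("too_generic", b), ("not_grounded", c), ("unsafe", d)]) =
    PySem.Dict.mk [("helpful", a + pvCnt "helpful" rows),
                   ("too_generic", b + pvCnt "too_generic" rows),
                   ("not_grounded", c + pvCnt "not_grounded" rows),
                   ("unsafe", d + pvCnt "unsafe" rows)] := by
  induction rows generalizing a b c d with
  | nil => simp [pvCnt]
  | cons r rs ih =>
    simp only [Pre_feedback_counts_py, List.all_cons, Bool.and_eq_true] at h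
    obtain ⟨h1, h2⟩ := h
    rw [PySem.Dict.contains_eq_isSome_get?] at h1
    obtain ⟨v, hv⟩ := Option.isSome_iff_exists.mp h1
    simp only [List.foldl_cons, hv]
    have h2' : Pre_feedback_counts_py rs := h2
    by_cases e1 : v = "helpful"
    · subst e1
      have hcont : (PySem.Dict.mk [("helpful", a), ("too_generic", b), ("not_grounded", c), ("unsafe", d)]).contains "helpful" = true := by
        simp [PySem.Dict.contains]
      have hmod : (PySem.Dict.mk [("helpful", a), ("too_generic", b), ("not_grounded", c), ("unsafe", d)]).modify "helpful" 0 (· + 1) = PySem.Dict.mk [("helpful", a + 1), ("too_generic", b), ("not_grounded", c), ("unsafe", d)] := by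
        simp [PySem.Dict.modify, PySem.Dict.insert, PySem.Dict.getD, PySem.Dict.get?]
      rw [hcont, if_pos rfl, hmod, ih h2]
      simp [pvCnt_cons, hv]
      ring
    · 
      by_cases e2 : v = "too_generic"
      · subst e2
        have hcont : (PySem.Dict.mk [("helpful", a), ("too_generic", b), ("not_grounded", c), ("unsafe", d)]).contains "too_generic" = true := by
          simp [PySem.Dict.contains]
        have hmod : (PySem.Dict.mk [("helpful", a), ("too_generic", b), ("not_grounded", c), ("unsafe", d)]).modify "too_generic" 0 (· + 1) = PySem.Dict.mk [("helpful", a), ("too_generic", b + 1), ("not_grounded", c), ("unsafe", d)] := by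
          simp [PySem.Dict.modify, PySem.Dict.insert, PySem.Dict.getD, PySem.Dict.get?]
        rw [hcont, if_pos rfl, hmod, ih h2]
        simp [pvCnt_cons, hv]
        ring
      · 
        by_cases e3 : v = "not_grounded"
        · subst e3
          have hcont : (PySem.Dict.mk [("helpful", a), ("too_generic", b), ("not_grounded", c), ("unsafe", d)]).contains "not_grounded" = true := by
            simp [PySem.Dict.contains]
          have hmod : (PySem.Dict.mk [("helpful", a), ("too_generic", b), ("not_grounded", c), ("unsafe", d)]).modify "not_grounded" 0 (· + 1) = PySem.Dict.mk [("helpful", a), ("too_generic", b), ("not_grounded", c + 1), ("unsafe", d)] := by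
            simp [PySem.Dict.modify, PySem.Dict.insert, PySem.Dict.getD, PySem.Dict.get?]
          rw [hcont, if_pos rfl, hmod, ih h2]
          simp [pvCnt_cons, hv]
          ring
        · 
          by_cases e4 : v = "unsafe"
          · subst e4
            have hcont : (PySem.Dict.mk [("helpful", a), ("too_generic", b), ("not_grounded", c), ("unsafe", d)]).contains "unsafe" = true := by
              simp [PySem.Dict.contains]
            have hmod : (PySem.Dict.mk [("helpful", a), ("too_generic", b), ("not_grounded", c), ("unsafe", d)]).modify "unsafe" 0 (· + 1) = PySem.Dict.mk [("helpful", a), ("too_generic", b), ("not_grounded", c), ("unsafe", d + 1)] := by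
              simp [PySem.Dict.modify, PySem.Dict.insert, PySem.Dict.getD, PySem.Dict.get?]
            rw [hcont, if_pos rfl, hmod, ih h2]
            simp [pvCnt_cons, hv]
            ring
          · 
            have hc : (PySem.Dict.mk [("helpful", a), ("too_generic", b), ("not_grounded", c), ("unsafe", d)]).contains v = false := by
              simp [PySem.Dict.contains]
              refine ⟨?_, ?_, ?_, ?_⟩ <;> intro hh <;> [exact e1 hh.symm; exact e2 hh.symm; exact e3 hh.symm; exact e4 hh.symm]
            rw [hc]
            simp only [Bool.false_eq_true, if_false]
            rw [ih h2]
            simp [pvCnt_cons, hv, e1, e2, e3, e4]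

-- ===== VERDICT (by name: the statement is the Claim_ definition above) =====
theorem feedback_counts_py_spec : Claim_equal_feedback_counts_py := by
  intro rows _ hpre
  unfold Spec_feedback_counts_py
  simp only [feedback_counts_py, feedback_counts_py_alt]
  rw [pvLoop_eq rows hpre 0 0 0 0]
  simp [PySem.Dict.insert, PySem.Dict.values, pvCnt]
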